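-- pv_equiv track=rewrite | github.com/MrBrantCode/unitest_baseline | mut_generate/mist_train_taco/taco_8930/solution.py | find_shortest_process_sequence
-- ===== SOURCE A (Python) =====
-- def find_shortest_process_sequence(start, end, processes):
--     if start == end:
--         return []
--
--     q = [(start, [])]
--     visited = set()
--
--     while q:
--         (current, path) = q.pop(0)
--         if current == end:
--             return path
--         visited.add(current)
--         for process in [p for p in processes if p[1] == current]:
--             if process[2] not in visited:
--                 q.append((process[2], path + [process[0]]))
--
--     return []
-- ===== SOURCE B (Python) =====
-- def find_shortest_process_sequence(start, end, processes):
--     if start == end: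
--         return []
--     q = [start]
--     parent = {}  # node -> (predecessor node, process name), recorded at first enqueue
--     visited = set()
--     head = 0
--     while head < len(q):
--         current = q[head]
--         head += 1
--         if current == end:
--             names = []
--             node = current
--             while node != start:
--                 (pred, name) = parent[node]
--                 names.append(name)
--                 node = pred
--             names.reverse()
--             return names
--         visited.add(current)
--         for p in processes:
--             if p[1] == current and p[2] not in visited:
--                 if p[2] not in parent:
--                     parent[p[2]] = (current, p[0])
--                 q.append(p[2])
--     return []
-- ===== Notes on version B (the rewrite author's own statement) =====
-- stated objective: alternative
-- what changed: B's BFS queue holds bare nodes with a predecessor map recorded at first enqueue (the name path is rebuilt backwards from end and reversed, and the queue is walked by a head index) instead of A's queue of (node, full-path-list) pairs copied at every enqueue.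
-- outside the precondition, e.g. on find_shortest_process_sequence(0, 1, [(9, 0, 1), (7, 1)]): A returns [9], B returns [9]
import Mathlib
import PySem

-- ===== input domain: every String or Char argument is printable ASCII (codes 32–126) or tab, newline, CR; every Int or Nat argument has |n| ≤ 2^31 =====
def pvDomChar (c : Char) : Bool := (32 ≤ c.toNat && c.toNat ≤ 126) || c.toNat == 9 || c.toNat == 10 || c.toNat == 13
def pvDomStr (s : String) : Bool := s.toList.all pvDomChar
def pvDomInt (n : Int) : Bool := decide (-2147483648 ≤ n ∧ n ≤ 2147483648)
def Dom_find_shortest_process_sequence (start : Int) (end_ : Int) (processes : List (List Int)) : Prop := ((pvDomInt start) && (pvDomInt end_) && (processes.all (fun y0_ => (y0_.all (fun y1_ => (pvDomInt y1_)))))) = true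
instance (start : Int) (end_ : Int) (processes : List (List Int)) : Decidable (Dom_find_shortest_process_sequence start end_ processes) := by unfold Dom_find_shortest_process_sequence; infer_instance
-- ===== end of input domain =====

-- B replaces A's queue of (node, full-path-list) pairs by a queue of bare nodes plus a
-- predecessor map recorded at first enqueue, rebuilding the name path backwards at the end
-- (objective: alternative decomposition; same BFS visit order).

-- total indexing used by both ports: Python p[i]; Python raises IndexError where the list is
-- too short — those inputs are excluded by Pre_ below, the default 0 is never reached there
def pvIx (p : List Int) (i : Int) : Int := PySem.List.pyGetD p i 0

-- ===== PORT A =====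
-- for process in [p for p in processes if p[1] == current]: if process[2] not in visited: q.append(...)
def pvA_expand (processes : List (List Int)) (current : Int) (path : List Int)
    (visited : PySem.Set Int) (q : List (Int × List Int)) : List (Int × List Int) :=
  (processes.filter (fun p => pvIx p 1 == current)).foldl
    (fun q p =>
      if ¬ PySem.Set.contains visited (pvIx p 2) then
        q ++ [(pvIx p 2, path ++ [pvIx p 0])]
      else q) q

-- the while loop of A; fuel only makes the recursion total, it is never exhausted in the proofs
def pvA_go (processes : List (List Int)) (end_ : Int) :
    Nat → List (Int × List Int) → PySem.Set Int → List Int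
  | 0, _, _ => []
  | fuel+1, q, visited =>
    match q with
    | [] => []
    | (current, path) :: rest =>
      if current = end_ then path
      else
        let visited' := PySem.Set.add visited current
        pvA_go processes end_ fuel (pvA_expand processes current path visited' rest) visited'

def find_shortest_process_sequence (start : Int) (end_ : Int) (processes : List (List Int)) : List Int :=
  if start = end_ then []
  else pvA_go processes end_ ((processes.length + 1) ^ (processes.length + 3) + 1)
         [(start, [])] PySem.Set.empty

-- ===== PORT B =====
-- parent dict lookup (first match; B only ever inserts FRESH keys, appended at the end,
-- so this assoc list is exactly the Python dict's behaviour here)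
def pvB_look (parent : List (Int × Int × Int)) (v : Int) : Option (Int × Int) :=
  match parent with
  | [] => none
  | (w, u, n) :: rest => if w == v then some (u, n) else pvB_look rest v

-- names = []; while node != start: (pred, name) = parent[node]; names.append(name); node = pred
-- names.reverse(); fuel parent.length+1 suffices (each step follows one dict entry)
def pvB_rebuild (start : Int) (parent : List (Int × Int × Int)) :
    Nat → Int → List Int → List Int
  | 0, _, names => names.reverse
  | f+1, node, names =>
    if node = start then names.reverse
    else
      match pvB_look parent node with
      | some (pred, name) => pvB_rebuild start parent f pred (names ++ [name])
      | none => names.reverse  -- Python KeyError; unreachable from B's states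

-- one loop body: for p in processes: if p[1]==current and p[2] not in visited: record parent if new; append node
def pvBstep (current : Int) (visited : PySem.Set Int)
    (st : List Int × List (Int × Int × Int)) (p : List Int) : List Int × List (Int × Int × Int) :=
  if pvIx p 1 == current && !(PySem.Set.contains visited (pvIx p 2)) then
    (st.1 ++ [pvIx p 2],
     if (pvB_look st.2 (pvIx p 2)).isSome then st.2
     else st.2 ++ [(pvIx p 2, current, pvIx p 0)])
  else st

def pvB_go (processes : List (List Int)) (start end_ : Int) :
    Nat → List Int → PySem.Set Int → List (Int × Int × Int) → List Int
  | 0, _, _, _ => []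
  | fuel+1, q, visited, parent =>
    match q with
    | [] => []
    | current :: rest =>
      if current = end_ then pvB_rebuild start parent (parent.length + 1) current []
      else
        let visited' := PySem.Set.add visited current
        let st := (processes.foldl (pvBstep current visited') (rest, parent))
        pvB_go processes start end_ fuel st.1 visited' st.2

def find_shortest_process_sequence_alt (start : Int) (end_ : Int) (processes : List (List Int)) : List Int :=
  if start = end_ then []
  else pvB_go processes start end_ ((processes.length + 1) ^ (processes.length + 3) + 1)
         [start] PySem.Set.empty []

-- ===== PRECONDITION & SPEC =====
-- Pre_ excludes (when start ≠ end) inputs with a process entry of fewer than 2 fields (A reads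
-- p[1] of every entry: IndexError) and 2-field entries whose source p[1] is start or a target of
-- some 3-field entry (those can be matched, and a matched 2-field entry raises IndexError on p[2]);
-- a 2-field entry whose source is reachable but never actually dequeued lets A return normally,
-- so Pre_ is slightly narrower than the exact raise set (see the cite in claim.json).
def Pre_find_shortest_process_sequence (start : Int) (end_ : Int) (processes : List (List Int)) : Prop :=
  start = end_ ∨ ∀ p ∈ processes, 2 ≤ p.length ∧
    (3 ≤ p.length ∨ pvIx p 1 ∉ start ::
      processes.filterMap (fun q => if 3 ≤ q.length then some (pvIx q 2) else none))
instance (start : Int) (end_ : Int) (processes : List (List Int)) : Decidable (Pre_find_shortest_process_sequence start end_ processes) := by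
  unfold Pre_find_shortest_process_sequence; infer_instance

def pvWitness_find_shortest_process_sequence : Int × Int × List (List Int) := (0, 2, [[5, 0, 1], [6, 1, 2]])

def Spec_find_shortest_process_sequence (start : Int) (end_ : Int) (processes : List (List Int)) (out : List Int) : Prop := out = find_shortest_process_sequence_alt start end_ processes
instance (start : Int) (end_ : Int) (processes : List (List Int)) (out : List Int) : Decidable (Spec_find_shortest_process_sequence start end_ processes out) := by unfold Spec_find_shortest_process_sequence; infer_instance

-- ===== CLAIM (what is proved, stated in full; the proofs are below) =====
def Claim_equal_find_shortest_process_sequence : Prop := ∀ (start : Int) (end_ : Int) (processes : List (List Int)), Dom_find_shortest_process_sequence start end_ processes → Pre_find_shortest_process_sequence start end_ processes → Spec_find_shortest_process_sequence start end_ processes (find_shortest_process_sequence start end_ processes)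

-- ===== LEMMAS AND PROOFS =====

def pvKeys (parent : List (Int × Int × Int)) : List Int := parent.map (fun e => e.1)

def pvFirst (qA : List (Int × List Int)) (v : Int) : Option (List Int) :=
  (qA.find? (fun e => e.1 == v)).map (fun e => e.2)

-- the path A's first still-enqueued entry of a node carries, as a chain of parent links
inductive pvPathTo (start : Int) (parent : List (Int × Int × Int)) : Int → List Int → Prop
  | base : pvPathTo start parent start []
  | step {v u n path} : pvB_look parent v = some (u, n) →
      pvPathTo start parent u path → pvPathTo start parent v (path ++ [n])

-- every parent entry points at start or at an earlier key (insertion order)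
def pvGrounded (start : Int) (parent : List (Int × Int × Int)) : Prop :=
  ∀ pre e post, parent = pre ++ e :: post → e.2.1 = start ∨ e.2.1 ∈ pvKeys pre

-- the lockstep invariant tying A's state (qA, V) to B's (qA.map fst, V, parent)
def pvInv (processes : List (List Int)) (start end_ : Int)
    (qA : List (Int × List Int)) (V : List Int) (parent : List (Int × Int × Int)) : Prop :=
  end_ ∉ V ∧
  start ∉ pvKeys parent ∧
  (pvKeys parent).Nodup ∧
  pvGrounded start parent ∧
  (∀ v p, pvFirst qA v = some p → v ∉ V → pvPathTo start parent v p) ∧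
  (∀ v ∈ V, ∀ p ∈ processes, pvIx p 1 = v → pvIx p 2 ∉ V → pvIx p 2 ∈ pvKeys parent) ∧
  (∀ w ∈ pvKeys parent, w ∉ V → w ∈ qA.map Prod.fst) ∧
  (∀ w ∈ qA.map Prod.fst, w = start ∨ w ∈ pvKeys parent) ∧
  (start ∈ V ∨ (qA.map Prod.fst = [start] ∧ parent = [] ∧ V = []))

theorem pvB_look_append (l : List (Int × Int × Int)) (e : Int × Int × Int) (v : Int) :
    pvB_look (l ++ [e]) v =
      (match pvB_look l v with
       | some r => some r
       | none => if e.1 == v then some e.2 else none) := by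
  induction l with
  | nil => rfl
  | cons h t ih =>
    obtain ⟨w, u, n⟩ := h
    by_cases hw : w = v <;> simp [pvB_look, hw, ih]

theorem pvB_look_isSome_iff (l : List (Int × Int × Int)) (v : Int) :
    (pvB_look l v).isSome = true ↔ v ∈ pvKeys l := by
  induction l with
  | nil => simp [pvB_look, pvKeys]
  | cons h t ih =>
    obtain ⟨w, u, n⟩ := h
    by_cases hw : w = v
    · subst hw; simp [pvB_look, pvKeys]
    · have hv : v ≠ w := fun e => hw e.symm
      simp only [pvB_look, pvKeys, List.map_cons, List.mem_cons]
      rw [if_neg (by simpa using hw)]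
      simp only [pvKeys] at ih
      rw [ih]
      constructor
      · exact fun h => Or.inr h
      · rintro (h | h)
        · exact absurd h hv
        · exact h

theorem pvB_look_mem (l : List (Int × Int × Int)) (v : Int) (r : Int × Int)
    (h : pvB_look l v = some r) : v ∈ pvKeys l := by
  have := (pvB_look_isSome_iff l v).1 (by simp [h])
  exact this

theorem pvB_look_none (l : List (Int × Int × Int)) (v : Int) (h : v ∉ pvKeys l) :
    pvB_look l v = none := by
  cases hl : pvB_look l v with
  | none => rfl
  | some r => exact absurd (pvB_look_mem l v r hl) h

theorem pvB_look_mono (l : List (Int × Int × Int)) (e : Int × Int × Int) (v : Int) (r : Int × Int)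
    (h : pvB_look l v = some r) : pvB_look (l ++ [e]) v = some r := by
  rw [pvB_look_append, h]

theorem pvB_look_append_fresh (l : List (Int × Int × Int)) (w u n : Int) (h : w ∉ pvKeys l) :
    pvB_look (l ++ [(w, u, n)]) w = some (u, n) := by
  rw [pvB_look_append, pvB_look_none l w h]
  simp

theorem pvPathTo_mono (start : Int) (l : List (Int × Int × Int)) (e : Int × Int × Int)
    (v : Int) (p : List Int) (h : pvPathTo start l v p) : pvPathTo start (l ++ [e]) v p := by
  induction h with
  | base => exact pvPathTo.base
  | step hl _ ih => exact pvPathTo.step (pvB_look_mono _ _ _ _ hl) ih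

theorem pvPathTo_start_nil (start : Int) (l : List (Int × Int × Int)) (p : List Int)
    (hs : start ∉ pvKeys l) (h : pvPathTo start l start p) : p = [] := by
  cases h with
  | base => rfl
  | step hl _ => exact absurd (pvB_look_mem _ _ _ hl) hs

theorem pv_snoc_inj {α : Type} (a b : List α) (x y : α) (h : a ++ [x] = b ++ [y]) :
    a = b ∧ x = y := by
  have h1 := congrArg List.reverse h
  simp only [List.reverse_append, List.reverse_cons, List.reverse_nil, List.nil_append,
    List.singleton_append, List.cons.injEq] at h1
  exact ⟨by simpa using congrArg List.reverse h1.2, h1.1⟩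

theorem pvGrounded_append (start : Int) (l : List (Int × Int × Int)) (e : Int × Int × Int)
    (hg : pvGrounded start l) (he : e.2.1 = start ∨ e.2.1 ∈ pvKeys l) :
    pvGrounded start (l ++ [e]) := by
  intro pre e' post hsplit
  rcases List.eq_nil_or_concat post with hpost | ⟨ps, pl, hpost⟩
  · subst hpost
    obtain ⟨hl, hee⟩ := pv_snoc_inj l pre e e' hsplit
    subst hl
    cases hee
    exact he
  · subst hpost
    have h2 : l ++ [e] = (pre ++ e' :: ps) ++ [pl] := by
      rw [hsplit]; simp
    obtain ⟨hl, _⟩ := pv_snoc_inj _ _ _ _ h2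
    exact hg pre e' ps hl

-- idxOf-style helpers over plain Int lists
theorem pv_idx_concat (v : Int) (l1 l2 : List Int) (h : v ∉ l1) :
    (l1 ++ v :: l2).idxOf v = l1.length := by
  induction l1 with
  | nil => simp
  | cons x xs ih =>
    have hx : x ≠ v := fun e => h (by simp [e])
    have hv : v ∉ xs := fun m => h (by simp [m])
    rw [List.cons_append, List.idxOf_cons_ne _ hx, ih hv]
    rfl

theorem pv_idx_prefix (v : Int) (l1 l2 : List Int) (h : v ∈ l1) :
    (l1 ++ l2).idxOf v < l1.length := by
  induction l1 with
  | nil => simp at h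
  | cons x xs ih =>
    by_cases hx : x = v
    · subst hx
      rw [List.cons_append, List.idxOf_cons_self]
      simp
    · rcases List.mem_cons.1 h with h1 | h1
      · exact absurd h1.symm hx
      · rw [List.cons_append, List.idxOf_cons_ne _ hx]
        exact Nat.succ_lt_succ (ih h1)

theorem pvB_look_split (l : List (Int × Int × Int)) (v : Int) (r : Int × Int)
    (h : pvB_look l v = some r) :
    ∃ pre post, l = pre ++ (v, r) :: post ∧ v ∉ pvKeys pre := by
  induction l with
  | nil => simp [pvB_look] at h
  | cons e t ih =>
    obtain ⟨w, u, n⟩ := e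
    by_cases hw : w = v
    · subst hw
      simp [pvB_look] at h
      exact ⟨[], t, by simp [h], by simp [pvKeys]⟩
    · rw [pvB_look, if_neg (by simpa using hw)] at h
      obtain ⟨pre, post, h1, h2⟩ := ih h
      refine ⟨(w, u, n) :: pre, post, by simp [h1], ?_⟩
      simp only [pvKeys, List.map_cons, List.mem_cons, not_or]
      simp only [pvKeys] at h2
      exact ⟨fun e => hw e.symm, h2⟩

-- chains follow strictly earlier dict entries
theorem pvPathTo_idx (start : Int) (parent : List (Int × Int × Int))
    (hs : start ∉ pvKeys parent) (hg : pvGrounded start parent)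
    (v : Int) (p : List Int) (h : pvPathTo start parent v p) :
    v = start ∨ (v ∈ pvKeys parent ∧ p.length ≤ (pvKeys parent).idxOf v + 1) := by
  induction h with
  | base => exact Or.inl rfl
  | @step v u n path hl hp ih =>
    right
    obtain ⟨pre, post, hsplit, hpre⟩ := pvB_look_split _ _ _ hl
    have hkeys : pvKeys parent = pvKeys pre ++ v :: pvKeys post := by
      rw [hsplit]; simp [pvKeys]
    have hvmem : v ∈ pvKeys parent := pvB_look_mem _ _ _ hl
    have hidxv : (pvKeys parent).idxOf v = (pvKeys pre).length := by
      rw [hkeys]; exact pv_idx_concat v (pvKeys pre) (pvKeys post) hpre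
    have hgu : u = start ∨ u ∈ pvKeys pre := by
      have := hg pre (v, (u, n)) post hsplit
      simpa using this
    by_cases hu0 : u = start
    · have hnil : path = [] := pvPathTo_start_nil _ _ _ hs (by rwa [hu0] at hp)
      refine ⟨hvmem, ?_⟩
      simp [hnil]
    · have h1 : u ∈ pvKeys pre := hgu.resolve_left hu0
      have hihm : path.length ≤ (pvKeys parent).idxOf u + 1 := ((ih.resolve_left hu0)).2
      have hu : (pvKeys parent).idxOf u < (pvKeys pre).length := by
        rw [hkeys]
        exact pv_idx_prefix u (pvKeys pre) (v :: pvKeys post) h1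
      refine ⟨hvmem, ?_⟩
      rw [hidxv]
      have hfin : (path ++ [n]).length = path.length + 1 := by simp
      omega

-- the chain of parent links of any reachable node is no longer than the dict
theorem pvPathTo_len (start : Int) (parent : List (Int × Int × Int))
    (hs : start ∉ pvKeys parent) (hg : pvGrounded start parent)
    (v : Int) (p : List Int) (h : pvPathTo start parent v p) :
    p.length ≤ parent.length := by
  rcases pvPathTo_idx start parent hs hg v p h with h1 | ⟨hm, hl⟩
  · have hnil : p = [] := pvPathTo_start_nil _ _ _ hs (h1 ▸ h)
    simp [hnil]
  · have hlt : (pvKeys parent).idxOf v < (pvKeys parent).length := by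
      have := pv_idx_prefix v (pvKeys parent) [] hm
      simpa using this
    have hlen : (pvKeys parent).length = parent.length := by simp [pvKeys]
    omega

theorem pvB_rebuild_eq (start : Int) (parent : List (Int × Int × Int))
    (hs : start ∉ pvKeys parent) (v : Int) (p : List Int)
    (h : pvPathTo start parent v p) :
    ∀ f acc, p.length + 1 ≤ f → pvB_rebuild start parent f v acc = p ++ acc.reverse := by
  induction h with
  | base =>
    intro f acc hf
    match f, hf with
    | g+1, _ => simp [pvB_rebuild]
  | @step v u n path hl hp ih =>
    intro f acc hf
    match f, hf with
    | g+1, hf =>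
      have hv : v ≠ start := by
        intro e; subst e; exact hs (pvB_look_mem _ _ _ hl)
      simp only [pvB_rebuild, if_neg hv, hl]
      rw [ih g (acc ++ [n]) (by simp at hf ⊢; omega)]
      simp

theorem pvFirst_none_iff (q : List (Int × List Int)) (v : Int) :
    pvFirst q v = none ↔ v ∉ q.map Prod.fst := by
  induction q with
  | nil => simp [pvFirst]
  | cons e t ih =>
    by_cases he : e.1 = v
    · rw [pvFirst, List.find?_cons_of_pos (by simpa using he)]
      simp [he]
    · rw [pvFirst, List.find?_cons_of_neg (by simpa using he)]
      simp only [List.map_cons, List.mem_cons, not_or]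
      rw [show ((List.find? (fun e => e.1 == v) t).map (fun e => e.2) = none) =
        (pvFirst t v = none) from rfl, ih]
      have hv : ¬ v = e.1 := fun x => he x.symm
      tauto

theorem pvFirst_cons_self (q : List (Int × List Int)) (v : Int) (p : List Int) :
    pvFirst ((v, p) :: q) v = some p := by
  rw [pvFirst, List.find?_cons_of_pos (by simp)]
  rfl

theorem pvFirst_cons_ne (q : List (Int × List Int)) (e : Int × List Int) (w : Int)
    (h : e.1 ≠ w) : pvFirst (e :: q) w = pvFirst q w := by
  rw [pvFirst, List.find?_cons_of_neg (by simpa using h)]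
  rfl

theorem pvFirst_append_sing (q : List (Int × List Int)) (e : Int × List Int) (w : Int) :
    pvFirst (q ++ [e]) w =
      (match pvFirst q w with
       | some p => some p
       | none => if e.1 == w then some e.2 else none) := by
  induction q with
  | nil =>
    by_cases he : e.1 = w
    · rw [List.nil_append, pvFirst, List.find?_cons_of_pos (by simpa using he)]
      simp [pvFirst, he]
    · rw [List.nil_append, pvFirst, List.find?_cons_of_neg (by simpa using he)]
      simp [pvFirst, he]
  | cons x xs ih =>
    by_cases hx : x.1 = w
    · rw [List.cons_append, pvFirst, List.find?_cons_of_pos (by simpa using hx),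
        pvFirst, List.find?_cons_of_pos (by simpa using hx)]
      rfl
    · rw [List.cons_append, pvFirst_cons_ne _ _ _ hx, pvFirst_cons_ne _ _ _ hx, ih]

-- A's expansion as a guarded fold over the full process list (for the lockstep induction)
def pvAstep (current : Int) (path : List Int) (visited : PySem.Set Int)
    (q : List (Int × List Int)) (p : List Int) : List (Int × List Int) :=
  if pvIx p 1 == current then
    (if ¬ PySem.Set.contains visited (pvIx p 2) then
      q ++ [(pvIx p 2, path ++ [pvIx p 0])] else q)
  else q

theorem pvA_expand_eq (processes : List (List Int)) (current : Int) (path : List Int)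
    (visited : PySem.Set Int) (q : List (Int × List Int)) :
    pvA_expand processes current path visited q =
      processes.foldl (pvAstep current path visited) q := by
  unfold pvA_expand pvAstep
  rw [List.foldl_filter]

-- the inner (one-expansion) lockstep lemma
theorem pvExpand_inv (start current : Int) (path : List Int) (V' : List Int)
    (hst : start ∈ V') :
    ∀ (ps : List (List Int)) (qA : List (Int × List Int)) (parent : List (Int × Int × Int)),
    start ∉ pvKeys parent →
    (pvKeys parent).Nodup →
    pvGrounded start parent →
    (∀ v p, pvFirst qA v = some p → v ∉ V' → pvPathTo start parent v p) →
    (∀ w ∈ pvKeys parent, w ∉ V' → w ∈ qA.map Prod.fst) →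
    (∀ w ∈ qA.map Prod.fst, w = start ∨ w ∈ pvKeys parent) →
    ((pvPathTo start parent current path ∧ (current = start ∨ current ∈ pvKeys parent)) ∨
      (∀ p ∈ ps, pvIx p 1 = current → pvIx p 2 ∉ V' → pvIx p 2 ∈ pvKeys parent)) →
    (ps.foldl (pvBstep current V') (qA.map Prod.fst, parent)).1 =
        (ps.foldl (pvAstep current path V') qA).map Prod.fst ∧
    start ∉ pvKeys (ps.foldl (pvBstep current V') (qA.map Prod.fst, parent)).2 ∧
    (pvKeys (ps.foldl (pvBstep current V') (qA.map Prod.fst, parent)).2).Nodup ∧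
    pvGrounded start (ps.foldl (pvBstep current V') (qA.map Prod.fst, parent)).2 ∧
    (∀ v p, pvFirst (ps.foldl (pvAstep current path V') qA) v = some p → v ∉ V' →
      pvPathTo start (ps.foldl (pvBstep current V') (qA.map Prod.fst, parent)).2 v p) ∧
    (∀ w ∈ pvKeys (ps.foldl (pvBstep current V') (qA.map Prod.fst, parent)).2, w ∉ V' →
      w ∈ (ps.foldl (pvAstep current path V') qA).map Prod.fst) ∧
    (∀ w ∈ (ps.foldl (pvAstep current path V') qA).map Prod.fst, w = start ∨
      w ∈ pvKeys (ps.foldl (pvBstep current V') (qA.map Prod.fst, parent)).2) ∧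
    (∀ x ∈ pvKeys parent, x ∈ pvKeys (ps.foldl (pvBstep current V') (qA.map Prod.fst, parent)).2) ∧
    (∀ p ∈ ps, pvIx p 1 = current → pvIx p 2 ∉ V' →
      pvIx p 2 ∈ pvKeys (ps.foldl (pvBstep current V') (qA.map Prod.fst, parent)).2) := by
  intro ps
  induction ps with
  | nil =>
    intro qA parent h1 h2 h3 h4 h5 h6 _h8
    exact ⟨rfl, h1, h2, h3, h4, h5, h6, fun x hx => hx,
      fun p hp => absurd hp List.not_mem_nil⟩
  | cons p ps ih =>
    intro qA parent h1 h2 h3 h4 h5 h6 h8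
    by_cases hc : pvIx p 1 = current
    · by_cases hm : pvIx p 2 ∈ V'
      · -- target already visited: both sides skip
        have hA : pvAstep current path V' qA p = qA := by
          simp [pvAstep, hc, hm]
        have hB : pvBstep current V' (qA.map Prod.fst, parent) p = (qA.map Prod.fst, parent) := by
          simp [pvBstep, hc, hm]
        have h8' := h8.imp id (fun hj => fun q hq => hj q (List.mem_cons_of_mem _ hq))
        obtain ⟨c1, c2, c3, c4, c5, c6, c7, c8, c9⟩ := ih qA parent h1 h2 h3 h4 h5 h6 h8'
        rw [List.foldl_cons, List.foldl_cons, hA, hB]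
        refine ⟨c1, c2, c3, c4, c5, c6, c7, c8, ?_⟩
        intro q hq hq1 hq2
        rcases List.mem_cons.1 hq with rfl | hq
        · exact absurd hm hq2
        · exact c9 q hq hq1 hq2
      · -- active edge
        have hw0 : pvIx p 2 ≠ start := fun e => hm (e ▸ hst)
        have hA : pvAstep current path V' qA p =
            qA ++ [(pvIx p 2, path ++ [pvIx p 0])] := by
          simp [pvAstep, hc, hm]
        have hmapA : (qA ++ [(pvIx p 2, path ++ [pvIx p 0])]).map Prod.fst =
            qA.map Prod.fst ++ [pvIx p 2] := by simp
        by_cases hk : pvIx p 2 ∈ pvKeys parent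
        · -- node already discovered: parent unchanged, duplicate entry appended
          have hB : pvBstep current V' (qA.map Prod.fst, parent) p =
              (qA.map Prod.fst ++ [pvIx p 2], parent) := by
            have h0 : (pvB_look parent (pvIx p 2)).isSome = true :=
              (pvB_look_isSome_iff _ _).2 hk
            simp [pvBstep, hc, hm, h0]
          have h4' : ∀ v q, pvFirst (qA ++ [(pvIx p 2, path ++ [pvIx p 0])]) v = some q →
              v ∉ V' → pvPathTo start parent v q := by
            intro v q hf hv
            rw [pvFirst_append_sing] at hf
            cases hfq : pvFirst qA v with
            | some q0 =>
              rw [hfq] at hf; cases hf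
              exact h4 v _ hfq hv
            | none =>
              rw [hfq] at hf
              by_cases hv2 : pvIx p 2 = v
              · subst hv2
                exact absurd (h5 _ hk hv) ((pvFirst_none_iff _ _).1 hfq)
              · rw [if_neg (by simpa using hv2)] at hf
                cases hf
          have h5' : ∀ w ∈ pvKeys parent, w ∉ V' →
              w ∈ (qA ++ [(pvIx p 2, path ++ [pvIx p 0])]).map Prod.fst := by
            intro w hwk hwv
            rw [hmapA]
            exact List.mem_append_left _ (h5 w hwk hwv)
          have h6' : ∀ w ∈ (qA ++ [(pvIx p 2, path ++ [pvIx p 0])]).map Prod.fst,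
              w = start ∨ w ∈ pvKeys parent := by
            intro w hw
            rw [hmapA] at hw
            rcases List.mem_append.1 hw with hw | hw
            · exact h6 w hw
            · simp at hw; subst hw; exact Or.inr hk
          have h8' := h8.imp id (fun hj => fun q hq => hj q (List.mem_cons_of_mem _ hq))
          obtain ⟨c1, c2, c3, c4, c5, c6, c7, c8, c9⟩ :=
            ih (qA ++ [(pvIx p 2, path ++ [pvIx p 0])]) parent h1 h2 h3 h4' h5' h6' h8'
          rw [List.foldl_cons, List.foldl_cons, hA, hB, ← hmapA]
          refine ⟨c1, c2, c3, c4, c5, c6, c7, c8, ?_⟩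
          intro q hq hq1 hq2
          rcases List.mem_cons.1 hq with rfl | hq
          · exact c8 _ hk
          · exact c9 q hq hq1 hq2
        · -- fresh node: record its parent
          have hgood : pvPathTo start parent current path ∧
              (current = start ∨ current ∈ pvKeys parent) := by
            rcases h8 with hg | hj
            · exact hg
            · exact absurd (hj p (by simp) hc hm) hk
          have hB : pvBstep current V' (qA.map Prod.fst, parent) p =
              (qA.map Prod.fst ++ [pvIx p 2],
               parent ++ [(pvIx p 2, current, pvIx p 0)]) := by
            have h0 : (pvB_look parent (pvIx p 2)).isSome = false := by
              simp only [pvB_look_none parent _ hk, Option.isSome_none]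
            simp [pvBstep, hc, hm, h0]
          have hkeys' : pvKeys (parent ++ [(pvIx p 2, current, pvIx p 0)]) =
              pvKeys parent ++ [pvIx p 2] := by simp [pvKeys]
          have h1' : start ∉ pvKeys (parent ++ [(pvIx p 2, current, pvIx p 0)]) := by
            rw [hkeys']
            intro hmem
            rcases List.mem_append.1 hmem with hx | hx
            · exact h1 hx
            · simp at hx; exact hw0 hx.symm
          have h2' : (pvKeys (parent ++ [(pvIx p 2, current, pvIx p 0)])).Nodup := by
            rw [hkeys']
            simp only [List.nodup_append, List.nodup_singleton, true_and, h2]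
            intro a ha b hb
            simp only [List.mem_singleton] at hb
            subst hb
            exact fun hab => hk (hab ▸ ha)
          have h3' : pvGrounded start (parent ++ [(pvIx p 2, current, pvIx p 0)]) :=
            pvGrounded_append start parent _ h3 (by simpa using hgood.2)
          have hwnotq : pvIx p 2 ∉ qA.map Prod.fst := by
            intro hmem
            rcases h6 _ hmem with hx | hx
            · exact hw0 hx
            · exact hk hx
          have h4' : ∀ v q, pvFirst (qA ++ [(pvIx p 2, path ++ [pvIx p 0])]) v = some q →
              v ∉ V' → pvPathTo start (parent ++ [(pvIx p 2, current, pvIx p 0)]) v q := by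
            intro v q hf hv
            rw [pvFirst_append_sing] at hf
            cases hfq : pvFirst qA v with
            | some q0 =>
              rw [hfq] at hf; cases hf
              exact pvPathTo_mono _ _ _ _ _ (h4 v _ hfq hv)
            | none =>
              rw [hfq] at hf
              by_cases hv2 : pvIx p 2 = v
              · subst hv2
                rw [if_pos (by simp)] at hf
                cases hf
                exact pvPathTo.step (pvB_look_append_fresh parent _ current (pvIx p 0) hk)
                  (pvPathTo_mono _ _ _ _ _ hgood.1)
              · rw [if_neg (by simpa using hv2)] at hf
                cases hf
          have h5' : ∀ w ∈ pvKeys (parent ++ [(pvIx p 2, current, pvIx p 0)]), w ∉ V' →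
              w ∈ (qA ++ [(pvIx p 2, path ++ [pvIx p 0])]).map Prod.fst := by
            intro w hwk hwv
            rw [hmapA]
            rw [hkeys'] at hwk
            rcases List.mem_append.1 hwk with hx | hx
            · exact List.mem_append_left _ (h5 w hx hwv)
            · simp at hx; subst hx; simp
          have h6' : ∀ w ∈ (qA ++ [(pvIx p 2, path ++ [pvIx p 0])]).map Prod.fst,
              w = start ∨ w ∈ pvKeys (parent ++ [(pvIx p 2, current, pvIx p 0)]) := by
            intro w hw
            rw [hmapA] at hw
            rw [hkeys']
            rcases List.mem_append.1 hw with hw | hw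
            · rcases h6 w hw with hx | hx
              · exact Or.inl hx
              · exact Or.inr (List.mem_append_left _ hx)
            · simp at hw; subst hw; exact Or.inr (by simp)
          have h8' : (pvPathTo start (parent ++ [(pvIx p 2, current, pvIx p 0)]) current path ∧
              (current = start ∨ current ∈ pvKeys (parent ++ [(pvIx p 2, current, pvIx p 0)]))) ∨
              (∀ q ∈ ps, pvIx q 1 = current → pvIx q 2 ∉ V' →
                pvIx q 2 ∈ pvKeys (parent ++ [(pvIx p 2, current, pvIx p 0)])) :=
            Or.inl ⟨pvPathTo_mono _ _ _ _ _ hgood.1,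
              hgood.2.imp id (fun hx => by rw [hkeys']; exact List.mem_append_left _ hx)⟩
          obtain ⟨c1, c2, c3, c4, c5, c6, c7, c8, c9⟩ :=
            ih (qA ++ [(pvIx p 2, path ++ [pvIx p 0])])
               (parent ++ [(pvIx p 2, current, pvIx p 0)]) h1' h2' h3' h4' h5' h6' h8'
          rw [List.foldl_cons, List.foldl_cons, hA, hB, ← hmapA]
          refine ⟨c1, c2, c3, c4, c5, c6, c7, ?_, ?_⟩
          · intro x hx
            exact c8 x (by rw [hkeys']; exact List.mem_append_left _ hx)
          · intro q hq hq1 hq2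
            rcases List.mem_cons.1 hq with rfl | hq
            · exact c8 _ (by rw [hkeys']; simp)
            · exact c9 q hq hq1 hq2
    · -- edge does not leave current: both sides skip
      have hA : pvAstep current path V' qA p = qA := by
        simp [pvAstep, hc]
      have hB : pvBstep current V' (qA.map Prod.fst, parent) p = (qA.map Prod.fst, parent) := by
        simp [pvBstep, hc]
      have h8' := h8.imp id (fun hj => fun q hq => hj q (List.mem_cons_of_mem _ hq))
      obtain ⟨c1, c2, c3, c4, c5, c6, c7, c8, c9⟩ := ih qA parent h1 h2 h3 h4 h5 h6 h8'
      rw [List.foldl_cons, List.foldl_cons, hA, hB]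
      refine ⟨c1, c2, c3, c4, c5, c6, c7, c8, ?_⟩
      intro q hq hq1 hq2
      rcases List.mem_cons.1 hq with rfl | hq
      · exact absurd hq1 hc
      · exact c9 q hq hq1 hq2

-- the main lockstep induction
theorem pvLockstep (processes : List (List Int)) (start end_ : Int) :
    ∀ (fuel : Nat) (qA : List (Int × List Int)) (V : List Int) (parent : List (Int × Int × Int)),
    pvInv processes start end_ qA V parent →
    pvA_go processes end_ fuel qA V = pvB_go processes start end_ fuel (qA.map Prod.fst) V parent := by
  intro fuel
  induction fuel with
  | zero => intro qA V parent _; rfl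
  | succ fuel ih =>
    intro qA V parent hinv
    obtain ⟨i1, i2, i3, i4, i5, i6, i7, i8, i9⟩ := hinv
    cases qA with
    | nil => rfl
    | cons e rest =>
      obtain ⟨current, path⟩ := e
      by_cases hend : current = end_
      · -- both sides return the path to end_
        have hfirst : pvFirst ((current, path) :: rest) current = some path :=
          pvFirst_cons_self rest current path
        have hnv : current ∉ V := fun h => i1 (hend ▸ h)
        have hp : pvPathTo start parent current path := i5 current path hfirst hnv
        have hlen := pvPathTo_len start parent i2 i4 current path hp
        simp only [pvA_go, pvB_go, List.map_cons, if_pos hend]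
        rw [pvB_rebuild_eq start parent i2 current path hp (parent.length + 1) [] (by omega)]
        simp
      · -- both sides expand current and continue in lockstep
        have hst' : start ∈ PySem.Set.add V current := by
          rcases i9 with h | ⟨hq, _, _⟩
          · exact (PySem.Set.mem_add _ _ _).2 (Or.inl h)
          · simp at hq
            rw [hq.1]
            exact (PySem.Set.mem_add _ _ _).2 (Or.inr rfl)
        have hcur' : current ∈ PySem.Set.add V current :=
          (PySem.Set.mem_add _ _ _).2 (Or.inr rfl)
        have hVsub : ∀ x ∈ V, x ∈ PySem.Set.add V current :=
          fun x hx => (PySem.Set.mem_add _ _ _).2 (Or.inl hx)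
        have h4' : ∀ v q, pvFirst rest v = some q → v ∉ PySem.Set.add V current →
            pvPathTo start parent v q := by
          intro v q hf hv
          have hvc : v ≠ current := fun e => hv (e ▸ hcur')
          have hvV : v ∉ V := fun h => hv (hVsub v h)
          exact i5 v q (by rwa [pvFirst_cons_ne _ _ _ (fun e => hvc e.symm)]) hvV
        have h5' : ∀ w ∈ pvKeys parent, w ∉ PySem.Set.add V current →
            w ∈ rest.map Prod.fst := by
          intro w hwk hwv
          have hwc : w ≠ current := fun e => hwv (e ▸ hcur')
          have hwV : w ∉ V := fun h => hwv (hVsub w h)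
          have := i7 w hwk hwV
          simp only [List.map_cons, List.mem_cons] at this
          exact this.resolve_left hwc
        have h6' : ∀ w ∈ rest.map Prod.fst, w = start ∨ w ∈ pvKeys parent := by
          intro w hw
          exact i8 w (by simp [hw])
        have h8' : (pvPathTo start parent current path ∧
            (current = start ∨ current ∈ pvKeys parent)) ∨
            (∀ p ∈ processes, pvIx p 1 = current → pvIx p 2 ∉ PySem.Set.add V current →
              pvIx p 2 ∈ pvKeys parent) := by
          by_cases hcv : current ∈ V
          · right
            intro p hp hp1 hp2
            exact i6 current hcv p hp hp1 (fun h => hp2 (hVsub _ h))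
          · left
            exact ⟨i5 current path (pvFirst_cons_self rest current path) hcv,
              i8 current (by simp)⟩
        obtain ⟨c1, c2, c3, c4, c5, c6, c7, c8, c9⟩ :=
          pvExpand_inv start current path (PySem.Set.add V current) hst' processes rest parent
            i2 i3 i4 h4' h5' h6' h8'
        have hinv' : pvInv processes start end_
            (processes.foldl (pvAstep current path (PySem.Set.add V current)) rest)
            (PySem.Set.add V current)
            (processes.foldl (pvBstep current (PySem.Set.add V current))
              (rest.map Prod.fst, parent)).2 := by
          refine ⟨?_, c2, c3, c4, c5, ?_, c6, c7, Or.inl hst'⟩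
          · intro h
            rcases (PySem.Set.mem_add _ _ _).1 h with h | h
            · exact i1 h
            · exact hend h.symm
          · intro v hvV' q hq hq1 hq2
            have hq2V : pvIx q 2 ∉ V := fun h => hq2 (hVsub _ h)
            rcases (PySem.Set.mem_add _ _ _).1 hvV' with hv | hv
            · exact c8 _ (i6 v hv q hq hq1 hq2V)
            · exact c9 q hq (hv ▸ hq1) hq2
        simp only [pvA_go, pvB_go, List.map_cons, if_neg hend]
        rw [pvA_expand_eq]
        have := ih (processes.foldl (pvAstep current path (PySem.Set.add V current)) rest)
          (PySem.Set.add V current)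
          (processes.foldl (pvBstep current (PySem.Set.add V current))
            (rest.map Prod.fst, parent)).2 hinv'
        rw [this, ← c1]

-- ===== VERDICT (by name: the statement is the Claim_ definition above) =====
theorem find_shortest_process_sequence_spec : Claim_equal_find_shortest_process_sequence := by
  intro start end_ processes _ _
  unfold Spec_find_shortest_process_sequence
  unfold find_shortest_process_sequence find_shortest_process_sequence_alt
  by_cases h : start = end_
  · simp [h]
  · simp only [if_neg h]
    have := pvLockstep processes start end_
      ((processes.length + 1) ^ (processes.length + 3) + 1)
      [(start, [])] PySem.Set.empty []
      (by
        refine ⟨by simp [PySem.Set.empty], by simp [pvKeys], by simp [pvKeys],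
          ?_, ?_, ?_, ?_, ?_, ?_⟩
        · intro pre e post hsplit
          simp at hsplit
        · intro v p hf hv
          by_cases hvs : v = start
          · subst hvs
            rw [pvFirst_cons_self] at hf
            cases hf
            exact pvPathTo.base
          · rw [pvFirst_cons_ne _ _ _ (by simpa using Ne.symm hvs)] at hf
            simp [pvFirst] at hf
        · intro v hv; simp [PySem.Set.empty] at hv
        · intro w hw; simp [pvKeys] at hw
        · intro w hw; simp at hw; exact Or.inl hw
        · exact Or.inr ⟨by simp, rfl, rfl⟩)
    simpa using this
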